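-- pv_equiv track=rewrite | github.com/CostasMalonas/-Python-Hellenic-Open-University-Python-coursework | 3_code_template.py | load_sets
-- ===== SOURCE A (Python) =====
-- def load_sets(employees):
--     # φόρτωμα των στοιχείων του πίνακα εργαζομένων στα σύνολα
--     employees_ls = employees.splitlines() # Χωρίζουμε το multiline string σε γραμμές και το εκχωρούμε σε λίστα
--     # Δημιουργία κενών sets
--     m = set()
--     f = set()
--     eng = set()
--     tech = set()
--     secr = set()
--     p1 = set()
--     p2 = set()
--     p3 = set()
--
--     dict_set = {} # Δημιουργία λεξικού που θα έχει σαν key το όνομα του set και σαν value το set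
--
--     # Παίρνουμε κάθε line από το employees_list και ελέγχουμε τι γράμματα υπάρχουν
--     # μέσα σε κάθε string. Κάθε φορά κάνουμε split το string μας στο 1ο κόμμα
--     # και παίρνουμε το όνομα των υπαλλήλων
--     for line in employees_ls:
--         if 'm' in line:
--             m.add(line.split(',')[0]) # Χώρισε στο 1ο κόμμα
--         if 'f' in line:
--             f.add(line.split(',')[0]) # Χώρισε στο 1ο κόμμα
--
--         if 'eng' in line:
--             eng.add(line.split(',')[0])
--
--         if 'tech' in line:
--             tech.add(line.split(',')[0])
--
--         if 'secr' in line: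
--             secr.add(line.split(',')[0])
--
--         if 'project1' in line:
--             p1.add(line.split(',')[0])
--
--         if 'project2' in line:
--             p2.add(line.split(',')[0])
--
--         if 'project3' in line:
--             p3.add(line.split(',')[0])
--
--
--
--
--
--     keys_list = ['m', 'f', 'eng', 'tech', 'secr', 'p1', 'p2', 'p3']
--     set_list = [m, f, eng, tech, secr, p1, p2, p3]
--
--     # Δημιουργία του λεξικού
--     set_dict = {}
--     for i, key in enumerate(keys_list): # Η enumerate επιστρέφει έναν αριθμό από 0 έως len(key_list) - 1 και τον εκχωρεί στο i
--         set_dict[key] = set_list[i]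
--
--     return set_dict
-- ===== SOURCE B (Python) =====
-- def load_sets(employees):
--     # Staged passes: one independent set comprehension per category, no shared
--     # accumulators and no separate dict-assembly loop.
--     lines = employees.splitlines()
--
--     def members(sub):
--         return {line.split(',')[0] for line in lines if sub in line}
--
--     return {'m': members('m'), 'f': members('f'), 'eng': members('eng'),
--             'tech': members('tech'), 'secr': members('secr'),
--             'p1': members('project1'), 'p2': members('project2'),
--             'p3': members('project3')}
-- ===== Notes on version B (the rewrite author's own statement) =====
-- stated objective: simpler
-- what changed: Replaces A's single pass maintaining 8 named set accumulators plus a separate enumerate/zip dict-building loop with eight independent staged passes: one set comprehension per category filtering the lines, and the dict is written down directly as a literal.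
import Mathlib
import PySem

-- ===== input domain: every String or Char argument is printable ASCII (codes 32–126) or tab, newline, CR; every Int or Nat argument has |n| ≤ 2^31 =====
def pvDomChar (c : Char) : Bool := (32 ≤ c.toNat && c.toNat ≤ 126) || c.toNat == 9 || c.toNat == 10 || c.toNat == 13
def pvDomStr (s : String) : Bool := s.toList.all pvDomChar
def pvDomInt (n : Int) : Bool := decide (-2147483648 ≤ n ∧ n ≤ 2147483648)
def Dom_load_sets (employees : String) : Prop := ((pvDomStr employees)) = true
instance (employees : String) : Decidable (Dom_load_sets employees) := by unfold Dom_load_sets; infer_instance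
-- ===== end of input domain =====

-- ===== PORT A =====
-- B replaces A's single pass over lines with 8 set accumulators (plus a separate dict-building loop)
-- by eight independent per-category set comprehensions over the lines; objective: simpler.
-- line.split(',')[0]: the separator "," is nonempty so split? returns some, and a split result is never empty, so [0] is the head.
def pvFirstField (line : String) : String :=
  ((PySem.Str.split? line ",").getD []).headD ""

abbrev PvT8 := PySem.Set String × PySem.Set String × PySem.Set String × PySem.Set String ×
  PySem.Set String × PySem.Set String × PySem.Set String × PySem.Set String

-- the body of A's per-line loop: the 8 membership checks updating the 8 sets
def pvStepA : PvT8 → String → PvT8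
  | (m, f, eng, tech, secr, p1, p2, p3), line =>
    let m := if PySem.Str.isIn "m" line then PySem.Set.add m (pvFirstField line) else m
    let f := if PySem.Str.isIn "f" line then PySem.Set.add f (pvFirstField line) else f
    let eng := if PySem.Str.isIn "eng" line then PySem.Set.add eng (pvFirstField line) else eng
    let tech := if PySem.Str.isIn "tech" line then PySem.Set.add tech (pvFirstField line) else tech
    let secr := if PySem.Str.isIn "secr" line then PySem.Set.add secr (pvFirstField line) else secr
    let p1 := if PySem.Str.isIn "project1" line then PySem.Set.add p1 (pvFirstField line) else p1
    let p2 := if PySem.Str.isIn "project2" line then PySem.Set.add p2 (pvFirstField line) else p2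
    let p3 := if PySem.Str.isIn "project3" line then PySem.Set.add p3 (pvFirstField line) else p3
    (m, f, eng, tech, secr, p1, p2, p3)

def load_sets (employees : String) : List (String × List String) :=
  let employees_ls := PySem.Str.splitlines employees
  let st := employees_ls.foldl pvStepA
    (PySem.Set.empty, PySem.Set.empty, PySem.Set.empty, PySem.Set.empty,
     PySem.Set.empty, PySem.Set.empty, PySem.Set.empty, PySem.Set.empty)
  let keys_list : List String := ["m", "f", "eng", "tech", "secr", "p1", "p2", "p3"]
  let set_list : List (PySem.Set String) :=
    [st.1, st.2.1, st.2.2.1, st.2.2.2.1, st.2.2.2.2.1, st.2.2.2.2.2.1, st.2.2.2.2.2.2.1, st.2.2.2.2.2.2.2]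
  -- for i, key in enumerate(keys_list): set_dict[key] = set_list[i]
  let set_dict := (PySem.List.enumerate keys_list).foldl
    (fun d ik => d.insert ik.2 (PySem.List.pyGetD set_list ik.1 PySem.Set.empty))
    (PySem.Dict.empty : PySem.Dict String (PySem.Set String))
  set_dict.items

-- ===== PORT B =====
-- members(sub) = {line.split(',')[0] for line in lines if sub in line}
def pvMembers (lines : List String) (sub : String) : PySem.Set String :=
  lines.foldl
    (fun s line =>
      if PySem.Str.isIn sub line then
        PySem.Set.add s (((PySem.Str.split? line ",").getD []).headD "")
      else s)
    PySem.Set.empty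

-- the returned dict literal (distinct literal keys, insertion order)
def load_sets_alt (employees : String) : List (String × List String) :=
  let lines := PySem.Str.splitlines employees
  [("m", pvMembers lines "m"), ("f", pvMembers lines "f"),
   ("eng", pvMembers lines "eng"), ("tech", pvMembers lines "tech"),
   ("secr", pvMembers lines "secr"), ("p1", pvMembers lines "project1"),
   ("p2", pvMembers lines "project2"), ("p3", pvMembers lines "project3")]

-- ===== PRECONDITION & SPEC =====
def Spec_load_sets (employees : String) (out : List (String × List String)) : Prop := out = load_sets_alt employees
instance (employees : String) (out : List (String × List String)) : Decidable (Spec_load_sets employees out) := by unfold Spec_load_sets; infer_instance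

-- ===== CLAIM =====
def Claim_equal_load_sets : Prop := ∀ (employees : String), Dom_load_sets employees → Spec_load_sets employees (load_sets employees)

-- ===== LEMMAS AND PROOFS =====
-- pvMembers generalized over the starting set, for the fold invariant
def pvG (lines : List String) (s : PySem.Set String) (sub : String) : PySem.Set String :=
  lines.foldl
    (fun s line =>
      if PySem.Str.isIn sub line then
        PySem.Set.add s (((PySem.Str.split? line ",").getD []).headD "")
      else s) s

-- A's single 8-accumulator pass computes, componentwise, the 8 independent passes of B
lemma pvFoldA_eq : ∀ (lines : List String) (t : PvT8),
    lines.foldl pvStepA t =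
      (pvG lines t.1 "m", pvG lines t.2.1 "f", pvG lines t.2.2.1 "eng",
       pvG lines t.2.2.2.1 "tech", pvG lines t.2.2.2.2.1 "secr",
       pvG lines t.2.2.2.2.2.1 "project1", pvG lines t.2.2.2.2.2.2.1 "project2",
       pvG lines t.2.2.2.2.2.2.2 "project3") := by
  intro lines
  induction lines with
  | nil => intro t; rfl
  | cons l ls ih =>
    intro t
    obtain ⟨m, f, eng, tech, secr, p1, p2, p3⟩ := t
    simp only [List.foldl, ih, pvStepA, pvG, pvFirstField]

-- A's zip-up loop produces exactly the literal association list of the 8 components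
lemma pvItems_eq (t : PvT8) :
    ((PySem.List.enumerate ["m", "f", "eng", "tech", "secr", "p1", "p2", "p3"]).foldl
      (fun d ik => d.insert ik.2 (PySem.List.pyGetD
        [t.1, t.2.1, t.2.2.1, t.2.2.2.1, t.2.2.2.2.1, t.2.2.2.2.2.1, t.2.2.2.2.2.2.1, t.2.2.2.2.2.2.2]
        ik.1 PySem.Set.empty))
      (PySem.Dict.empty : PySem.Dict String (PySem.Set String))).items =
    [("m", t.1), ("f", t.2.1), ("eng", t.2.2.1), ("tech", t.2.2.2.1),
     ("secr", t.2.2.2.2.1), ("p1", t.2.2.2.2.2.1), ("p2", t.2.2.2.2.2.2.1), ("p3", t.2.2.2.2.2.2.2)] := rfl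

-- ===== VERDICT =====
theorem load_sets_spec : Claim_equal_load_sets := by
  intro employees _
  unfold Spec_load_sets
  simp only [load_sets, load_sets_alt]
  rw [pvItems_eq, pvFoldA_eq]
  rfl
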